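-- pv_equiv track=rewrite | github.com/GGGomer/AoC2020 | 05/05a.py | calculate_sequence_value
-- ===== SOURCE A (Python) =====
-- def calculate_sequence_value(sequence):
--   sequence_value = 0
--
--   if sequence[0]:
--     sequence_value = 2**(len(sequence)-1)
--
--   cut_sequence = sequence[1:]
--   if cut_sequence:
--     sequence_value += calculate_sequence_value(cut_sequence)
--
--   return sequence_value
-- ===== SOURCE B (Python) =====
-- def calculate_sequence_value(sequence):
--   value = 0
--   for bit in sequence:
--     value = value * 2 + (1 if bit else 0)
--   return value
-- ===== Notes on version B (the rewrite author's own statement) =====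
-- stated objective: faster
-- what changed: Replaced the recursion that slices the list and recomputes len/2**k at every step with a single left-to-right fold accumulating value = value*2 + bit.
import Mathlib
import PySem

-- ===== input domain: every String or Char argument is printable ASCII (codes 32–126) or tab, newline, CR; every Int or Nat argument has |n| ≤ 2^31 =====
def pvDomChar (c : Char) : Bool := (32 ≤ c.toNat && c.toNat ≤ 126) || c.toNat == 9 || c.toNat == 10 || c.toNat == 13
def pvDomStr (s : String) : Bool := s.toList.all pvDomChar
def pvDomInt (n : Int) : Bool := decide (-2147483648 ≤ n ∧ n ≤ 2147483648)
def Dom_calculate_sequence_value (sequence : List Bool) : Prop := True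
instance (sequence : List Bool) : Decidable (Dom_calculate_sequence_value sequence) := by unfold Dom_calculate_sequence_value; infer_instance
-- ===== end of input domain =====

-- B replaces A's slice-and-recurse (recomputing len and 2**k each step, O(n^2)) with one
-- linear fold value := value*2 + bit.

-- ===== PORT A =====
-- A on [] raises IndexError (sequence[0]); that input is excluded by Pre_ below, and the
-- [] branch here is unreachable under Pre_.
def calculate_sequence_value (sequence : List Bool) : Int :=
  match sequence with
  | [] => 0
  | h :: t =>
    let sequence_value : Int := if h then 2 ^ t.length else 0
    sequence_value + (if t ≠ [] then calculate_sequence_value t else 0)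

-- ===== PORT B =====
def calculate_sequence_value_alt (sequence : List Bool) : Int :=
  sequence.foldl (fun value bit => value * 2 + (if bit then 1 else 0)) 0

-- ===== PRECONDITION & SPEC =====
-- Pre_ excludes only the empty list, on which Python A raises IndexError.
def Pre_calculate_sequence_value (sequence : List Bool) : Prop := sequence ≠ []
instance (sequence : List Bool) : Decidable (Pre_calculate_sequence_value sequence) := by unfold Pre_calculate_sequence_value; infer_instance
def pvWitness_calculate_sequence_value : List Bool := [true, false, true]

def Spec_calculate_sequence_value (sequence : List Bool) (out : Int) : Prop := out = calculate_sequence_value_alt sequence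
instance (sequence : List Bool) (out : Int) : Decidable (Spec_calculate_sequence_value sequence out) := by unfold Spec_calculate_sequence_value; infer_instance

-- ===== CLAIM =====
def Claim_equal_calculate_sequence_value : Prop := ∀ (sequence : List Bool), Dom_calculate_sequence_value sequence → Pre_calculate_sequence_value sequence → Spec_calculate_sequence_value sequence (calculate_sequence_value sequence)

-- ===== LEMMAS AND PROOFS =====

-- B's fold started from acc equals acc shifted past the remaining bits plus the fold from 0.
theorem alt_foldl_shift (l : List Bool) (acc : Int) :
    l.foldl (fun value bit => value * 2 + (if bit then 1 else 0)) acc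
      = acc * 2 ^ l.length + l.foldl (fun value bit => value * 2 + (if bit then 1 else 0)) 0 := by
  induction l generalizing acc with
  | nil => simp
  | cons h t ih =>
    simp only [List.foldl_cons, List.length_cons]
    rw [ih, ih ((0 : Int) * 2 + if h then 1 else 0)]
    ring

theorem a_eq_alt (l : List Bool) : calculate_sequence_value l = calculate_sequence_value_alt l := by
  induction l with
  | nil => rfl
  | cons h t ih =>
    show (if h then (2:Int) ^ t.length else 0) + (if t ≠ [] then calculate_sequence_value t else 0)
        = calculate_sequence_value_alt (h :: t)
    have ht : (if t ≠ [] then calculate_sequence_value t else 0) = calculate_sequence_value t := by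
      cases t <;> simp [calculate_sequence_value]
    rw [ht, ih]
    simp only [calculate_sequence_value_alt, List.foldl_cons]
    rw [alt_foldl_shift t ((0:Int) * 2 + if h then 1 else 0)]
    cases h <;> simp <;> ring

-- ===== VERDICT =====
theorem calculate_sequence_value_spec : Claim_equal_calculate_sequence_value := by
  intro s _ _
  exact a_eq_alt s
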